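-- pv_equiv track=rewrite | github.com/nateshv54/DSA | Arrays/Kadane Algorithm/Flip Bits.py | flipBits
-- ===== SOURCE A (Python) =====
-- def flipBits(arr, n):
--     # Initialize the count of total ones
--     total1 = 0
--
--     # Initialize the maximum difference for any subarray
--     max_val = 0
--
--     # Initialize the current difference for the subarray being considered
--     curr = 0
--
--     # Loop through each element in the array
--     for i in range(n):
--         # Increment total1 if the current element is 1
--         if arr[i] == 1:
--             total1 += 1
--
--         # Determine the value to be considered for finding the maximum sum
--         val = 0
--         if arr[i] == 1:
--             val = -1
--         else:
--             val = 1
--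
--         # Update the current difference for the subarray
--         curr = max(val, curr + val)
--
--         # Update the overall maximum difference
--         max_val = max(max_val, curr)
--
--     # Ensure max_val is at least 0
--     max_val = max(0, max_val)
--
--     # Calculate the final result by adding total1 and max_val
--     return total1 + max_val
-- ===== SOURCE B (Python) =====
-- def flipBits(arr, n):
--     # staged: map scanned elements to flip gains, count ones via the gains,
--     # then best-subarray by prefix sums against their running minimum
--     gains = [-1 if arr[i] == 1 else 1 for i in range(n)]
--     total1 = gains.count(-1)
--     best = 0
--     s = 0
--     low = 0
--     for g in gains:
--         s += g
--         if s - low > best: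
--             best = s - low
--         if s < low:
--             low = s
--     return total1 + best
-- ===== Notes on version B (the rewrite author's own statement) =====
-- stated objective: alternative
-- what changed: A's single fused loop (Kadane running-best with an inline ones-counter and a final max(0,.)) is replaced by staged passes: a comprehension mapping each scanned element to a +/-1 gain, total1 = gains.count(-1), and a prefix-sum / running-minimum scan over the gains with no final clamp.
import Mathlib
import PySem

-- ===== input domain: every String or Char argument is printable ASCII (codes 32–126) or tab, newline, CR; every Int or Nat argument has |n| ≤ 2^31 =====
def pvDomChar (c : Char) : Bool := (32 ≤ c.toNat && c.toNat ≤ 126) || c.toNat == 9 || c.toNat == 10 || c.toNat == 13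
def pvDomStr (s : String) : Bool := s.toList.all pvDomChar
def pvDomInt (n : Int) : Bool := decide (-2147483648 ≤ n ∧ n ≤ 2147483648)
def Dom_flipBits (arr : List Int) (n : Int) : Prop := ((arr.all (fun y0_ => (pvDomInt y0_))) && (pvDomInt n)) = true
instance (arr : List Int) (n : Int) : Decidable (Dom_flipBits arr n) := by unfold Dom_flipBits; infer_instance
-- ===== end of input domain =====

-- B replaces A's single fused Kadane loop by staged passes: a gains map, a count, and a prefix-sum/running-minimum scan (alternative, same cost).

-- ===== PORT A =====
-- one iteration of A's loop body; state = (total1, max_val, curr)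
def flipStepA (arr : List Int) (st : Int × Int × Int) (i : Int) : Int × Int × Int :=
  let total1 := if PySem.List.pyGetD arr i 0 = 1 then st.1 + 1 else st.1
  let val : Int := if PySem.List.pyGetD arr i 0 = 1 then -1 else 1
  let curr := max val (st.2.2 + val)
  let max_val := max st.2.1 curr
  (total1, max_val, curr)

def flipBits (arr : List Int) (n : Int) : Int :=
  let st := (PySem.List.pyRange 0 n 1).foldl (flipStepA arr) (0, 0, 0)
  st.1 + max 0 st.2.1

-- ===== PORT B =====
-- one iteration of B's scan over the gains list; state = (s, best, low)
def flipScanB (st : Int × Int × Int) (g : Int) : Int × Int × Int :=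
  let s := st.1 + g
  let best := if s - st.2.2 > st.2.1 then s - st.2.2 else st.2.1
  let low := if s < st.2.2 then s else st.2.2
  (s, best, low)

def flipBits_alt (arr : List Int) (n : Int) : Int :=
  let gains := (PySem.List.pyRange 0 n 1).map
    (fun i => if PySem.List.pyGetD arr i 0 = 1 then (-1 : Int) else 1)
  let total1 : Int := (gains.count (-1) : Int)
  let st := gains.foldl flipScanB (0, 0, 0)
  total1 + st.2.1

-- ===== PRECONDITION & SPEC =====
-- Python A indexes arr[i] for i in range(n), so it raises IndexError iff n > len(arr); Pre_ excludes exactly that.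
def Pre_flipBits (arr : List Int) (n : Int) : Prop := n ≤ arr.length
instance (arr : List Int) (n : Int) : Decidable (Pre_flipBits arr n) := by unfold Pre_flipBits; infer_instance
def pvWitness_flipBits : List Int × Int := ([1, 0, 1, 0, 0, 1], 6)

def Spec_flipBits (arr : List Int) (n : Int) (out : Int) : Prop := out = flipBits_alt arr n
instance (arr : List Int) (n : Int) (out : Int) : Decidable (Spec_flipBits arr n out) := by unfold Spec_flipBits; infer_instance

-- ===== CLAIM (what is proved, stated in full; the proofs are below) =====
def Claim_equal_flipBits : Prop := ∀ (arr : List Int) (n : Int), Dom_flipBits arr n → Pre_flipBits arr n → Spec_flipBits arr n (flipBits arr n)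

-- ===== LEMMAS AND PROOFS =====

-- A's max_val never decreases along the loop
lemma flipA_m_mono (arr : List Int) (l : List Int) : ∀ (t m c : Int),
    m ≤ (l.foldl (flipStepA arr) (t, m, c)).2.1 := by
  induction l with
  | nil => intro t m c; simp
  | cons i l ih =>
    intro t m c
    simp only [List.foldl]
    exact le_trans (le_max_left _ _) (ih _ _ _)

-- A's total1 component counts the -1 gains (i.e. the ones among the scanned elements)
lemma flipA_count (arr : List Int) (l : List Int) : ∀ (t m c : Int),
    (l.foldl (flipStepA arr) (t, m, c)).1 =
      t + ((l.map (fun i => if PySem.List.pyGetD arr i 0 = 1 then (-1 : Int) else 1)).count (-1) : Int) := by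
  induction l with
  | nil => intro t m c; simp
  | cons i l ih =>
    intro t m c
    simp only [List.foldl, List.map, List.count_cons]
    rw [ih]
    by_cases ha : PySem.List.pyGetD arr i 0 = 1 <;>
      simp [flipStepA, ha] <;> omega

-- B's scan over the gains tracks A's Kadane fold: started from low = s - max c 0 and
-- best = m, its best component follows A's max_val component
lemma flip_scan_rel (arr : List Int) (l : List Int) : ∀ (t m c s : Int),
    ∃ p q, (l.map (fun i => if PySem.List.pyGetD arr i 0 = 1 then (-1 : Int) else 1)).foldl
        flipScanB (s, m, s - max c 0) =
      (p, (l.foldl (flipStepA arr) (t, m, c)).2.1, q) := by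
  induction l with
  | nil => intro t m c s; exact ⟨s, s - max c 0, rfl⟩
  | cons i l ih =>
    intro t m c s
    simp only [List.foldl, List.map]
    have hstep : flipScanB (s, m, s - max c 0)
        (if PySem.List.pyGetD arr i 0 = 1 then (-1 : Int) else 1) =
        ((if PySem.List.pyGetD arr i 0 = 1 then s - 1 else s + 1),
         (flipStepA arr (t, m, c) i).2.1,
         (if PySem.List.pyGetD arr i 0 = 1 then s - 1 else s + 1) -
           max (flipStepA arr (t, m, c) i).2.2 0) := by
      by_cases ha : PySem.List.pyGetD arr i 0 = 1 <;>
        simp only [flipScanB, flipStepA, ha, if_pos, Prod.mk.injEq] <;>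
        refine ⟨?_, ?_, ?_⟩ <;> (try split_ifs) <;> omega
    rw [hstep]
    exact ih (flipStepA arr (t, m, c) i).1 (flipStepA arr (t, m, c) i).2.1
      (flipStepA arr (t, m, c) i).2.2 _

-- ===== VERDICT (by name: the statement is the Claim_ definition above) =====
theorem flipBits_spec : Claim_equal_flipBits := by
  unfold Claim_equal_flipBits
  intro arr n _ _
  unfold Spec_flipBits flipBits flipBits_alt
  obtain ⟨p, q, h⟩ := flip_scan_rel arr (PySem.List.pyRange 0 n 1) 0 0 0 0
  have h0 : (0 : Int) - max 0 0 = 0 := by omega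
  rw [h0] at h
  simp only [h, flipA_count arr (PySem.List.pyRange 0 n 1) 0 0 0]
  have := flipA_m_mono arr (PySem.List.pyRange 0 n 1) 0 0 0
  omega
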